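-- pv_equiv track=rewrite | github.com/orantrik/UE_appartment_placer | app/widgets/floor_gaps_dialog.py | compute_z_by_floor_cm
-- ===== SOURCE A (Python) =====
-- def compute_z_by_floor_cm(floors: list[int], default_cm: int,
--                           overrides: dict[int, int]) -> dict[int, int]:
--     """Cumulative Z(cm) per floor. Same semantics as generator._build_z_by_floor_cm.
--
--     Used by the dialog's live-preview; generator does the real thing server-side.
--     """
--     def _gap(n: int) -> int:
--         if n in overrides:
--             return int(overrides[n])
--         return int(default_cm)
--
--     touched = set(floors) | {0}
--     for k in overrides.keys():
--         try:
--             ki = int(k)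
--         except (TypeError, ValueError):
--             continue
--         touched.add(ki)
--         touched.add(ki + 1)
--     if not touched:
--         return {0: 0}
--     f_min = min(touched)
--     f_max = max(touched)
--
--     out: dict[int, int] = {0: 0}
--     z = 0
--     for n in range(0, f_max):
--         z += _gap(n)
--         out[n + 1] = z
--     z = 0
--     for n in range(0, f_min, -1):
--         z -= _gap(n - 1)
--         out[n - 1] = z
--     return out
-- ===== SOURCE B (Python) =====
-- def compute_z_by_floor_cm(floors: list[int], default_cm: int,
--                           overrides: dict[int, int]) -> dict[int, int]:
--     """Cumulative Z(cm) per floor: one forward prefix-sum pass over the whole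
--     touched span, then normalized so floor 0 sits at 0."""
--     touched = set(floors) | {0}
--     for k in overrides.keys():
--         touched.add(k)
--         touched.add(k + 1)
--     f_min = min(touched)
--     f_max = max(touched)
--
--     # single forward pass: raw prefix sums over [f_min, f_max]
--     pairs = []
--     running = 0
--     for f in range(f_min, f_max + 1):
--         pairs.append((f, running))
--         running += overrides.get(f, default_cm)
--
--     neg, nonneg = pairs[:-f_min], pairs[-f_min:]
--     base = nonneg[0][1]
--
--     out = {0: 0}
--     for f, v in nonneg[1:]:
--         out[f] = v - base
--     for f, v in reversed(neg):
--         out[f] = v - base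
--     return out
-- ===== Notes on version B (the rewrite author's own statement) =====
-- stated objective: alternative
-- what changed: Replaces A's two opposite-direction accumulator loops that write into the dict with a single forward prefix-sum pass over [f_min, f_max] into a pair list, followed by normalization by the floor-0 value and emission from slices of that list.
import Mathlib
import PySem

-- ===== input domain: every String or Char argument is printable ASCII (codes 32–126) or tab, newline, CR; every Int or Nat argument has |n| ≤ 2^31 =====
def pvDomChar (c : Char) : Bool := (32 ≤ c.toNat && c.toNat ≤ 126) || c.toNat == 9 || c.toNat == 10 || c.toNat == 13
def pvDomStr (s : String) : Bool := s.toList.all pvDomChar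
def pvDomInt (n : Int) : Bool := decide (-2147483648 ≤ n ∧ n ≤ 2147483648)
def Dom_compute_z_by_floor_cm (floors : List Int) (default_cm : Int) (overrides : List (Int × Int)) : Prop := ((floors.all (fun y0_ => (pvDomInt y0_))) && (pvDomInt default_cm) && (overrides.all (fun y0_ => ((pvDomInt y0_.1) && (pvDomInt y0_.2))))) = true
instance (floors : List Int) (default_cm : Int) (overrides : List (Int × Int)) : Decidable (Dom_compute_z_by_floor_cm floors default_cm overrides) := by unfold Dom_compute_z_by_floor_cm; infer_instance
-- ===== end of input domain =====

-- B replaces A's two opposite-direction accumulator loops with one forward prefix-sum pass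
-- over the touched span, then normalizes by the floor-0 value (objective: alternative; same cost).

-- ===== PORT A =====
-- _gap(n): 'if n in overrides: int(overrides[n]) else int(default_cm)' (the lookup is guarded by the membership test)
def pvGapA (overrides : List (Int × Int)) (default_cm : Int) (n : Int) : Int :=
  if PySem.Dict.contains (PySem.Dict.mk overrides) n then
    (PySem.Dict.get? (PySem.Dict.mk overrides) n).getD 0
  else default_cm

-- touched = set(floors) | {0}; then for each key k of overrides (already an int, so int(k) = k and
-- the try/except branch is dead) add k and k + 1.  Identical setup in A and B, so it is shared.
def pvTouched (floors : List Int) (overrides : List (Int × Int)) : PySem.Set Int :=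
  (overrides.map (·.1)).foldl (fun t k => PySem.Set.add (PySem.Set.add t k) (k + 1))
    (PySem.Set.union (PySem.Set.ofList floors) [0])

def compute_z_by_floor_cm (floors : List Int) (default_cm : Int) (overrides : List (Int × Int)) : List (Int × Int) :=
  let touched := pvTouched floors overrides
  if touched = [] then [((0 : Int), (0 : Int))]       -- 'if not touched' (dead: 0 ∈ touched)
  else
    -- min/max of a set: order-independent, = PySem.List.min?/max?; touched ≠ [] so getD is never hit
    let f_min := (PySem.List.min? touched (fun x => x)).getD 0
    let f_max := (PySem.List.max? touched (fun x => x)).getD 0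
    let fwd := (PySem.List.pyRange 0 f_max).foldl
        (fun (s : PySem.Dict Int Int × Int) n =>
          let z := s.2 + pvGapA overrides default_cm n
          (s.1.insert (n + 1) z, z))
        (PySem.Dict.mk [(0, 0)], 0)
    let bwd := (PySem.List.pyRange 0 f_min (-1)).foldl
        (fun (s : PySem.Dict Int Int × Int) n =>
          let z := s.2 - pvGapA overrides default_cm (n - 1)
          (s.1.insert (n - 1) z, z))
        (fwd.1, 0)
    bwd.1.items

-- ===== PORT B =====
-- overrides.get(f, default_cm)
def pvGapB (overrides : List (Int × Int)) (default_cm : Int) (n : Int) : Int :=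
  PySem.Dict.getD (PySem.Dict.mk overrides) n default_cm

def compute_z_by_floor_cm_alt (floors : List Int) (default_cm : Int) (overrides : List (Int × Int)) : List (Int × Int) :=
  let touched := pvTouched floors overrides
  let f_min := (PySem.List.min? touched (fun x => x)).getD 0
  let f_max := (PySem.List.max? touched (fun x => x)).getD 0
  let pairs := (PySem.List.pyRange f_min (f_max + 1)).foldl
      (fun (s : List (Int × Int) × Int) f =>
        (s.1 ++ [(f, s.2)], s.2 + pvGapB overrides default_cm f)) ([], 0)
  let neg := PySem.List.slice pairs.1 none (some (-f_min))
  let nonneg := PySem.List.slice pairs.1 (some (-f_min)) none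
  let base := ((PySem.List.pyGet? nonneg 0).getD (0, 0)).2   -- nonneg[0]: in range, nonneg is never empty
  let d1 := (PySem.List.slice nonneg (some 1) none).foldl
      (fun (d : PySem.Dict Int Int) p => d.insert p.1 (p.2 - base)) (PySem.Dict.mk [(0, 0)])
  let d2 := neg.reverse.foldl (fun (d : PySem.Dict Int Int) p => d.insert p.1 (p.2 - base)) d1
  d2.items

-- ===== PRECONDITION & SPEC =====
def Spec_compute_z_by_floor_cm (floors : List Int) (default_cm : Int) (overrides : List (Int × Int)) (out : List (Int × Int)) : Prop := out = compute_z_by_floor_cm_alt floors default_cm overrides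
instance (floors : List Int) (default_cm : Int) (overrides : List (Int × Int)) (out : List (Int × Int)) : Decidable (Spec_compute_z_by_floor_cm floors default_cm overrides out) := by unfold Spec_compute_z_by_floor_cm; infer_instance

-- ===== CLAIM (what is proved, stated in full; the proofs are below) =====
def Claim_equal_compute_z_by_floor_cm : Prop := ∀ (floors : List Int) (default_cm : Int) (overrides : List (Int × Int)), Dom_compute_z_by_floor_cm floors default_cm overrides → Spec_compute_z_by_floor_cm floors default_cm overrides (compute_z_by_floor_cm floors default_cm overrides)

-- ===== LEMMAS AND PROOFS =====

-- both gap functions are dict lookup with default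
theorem pvGapA_eq_pvGapB (overrides : List (Int × Int)) (default_cm n : Int) :
    pvGapA overrides default_cm n = pvGapB overrides default_cm n := by
  unfold pvGapA pvGapB
  rw [PySem.Dict.contains_eq_isSome_get?, PySem.Dict.getD_eq_get?_getD]
  cases PySem.Dict.get? (PySem.Dict.mk overrides) n <;> simp

-- prefix sums of gaps: pvCum g s k = g s + g (s+1) + … + g (s+k-1)
def pvCum (g : Int → Int) (s : Int) : Nat → Int
  | 0 => 0
  | k + 1 => pvCum g s k + g (s + k)

theorem pvCum_succ_left (g : Int → Int) (s : Int) (k : Nat) :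
    pvCum g s (k + 1) = g s + pvCum g (s + 1) k := by
  induction k with
  | zero => simp [pvCum]
  | succ k ih =>
      rw [show k + 1 + 1 = (k + 1) + 1 from rfl, pvCum, ih, pvCum]
      push_cast; ring_nf

theorem pvCum_add (g : Int → Int) (s : Int) (a b : Nat) :
    pvCum g s (a + b) = pvCum g s a + pvCum g (s + a) b := by
  induction b with
  | zero => simp [pvCum]
  | succ b ih =>
      rw [show a + (b + 1) = (a + b) + 1 from rfl, pvCum, ih, pvCum]
      push_cast; ring_nf

theorem zero_mem_pvTouched (floors : List Int) (overrides : List (Int × Int)) :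
    (0 : Int) ∈ pvTouched floors overrides := by
  unfold pvTouched
  have h : ∀ (l : List Int) (t : PySem.Set Int), (0 : Int) ∈ t →
      (0 : Int) ∈ l.foldl (fun t k => PySem.Set.add (PySem.Set.add t k) (k + 1)) t := by
    intro l
    induction l with
    | nil => intro t ht; simpa using ht
    | cons x xs ih =>
        intro t ht
        simp only [List.foldl_cons]
        exact ih _ (by rw [PySem.Set.mem_add]; left; rw [PySem.Set.mem_add]; left; exact ht)
  exact h _ _ (by rw [PySem.Set.mem_union]; right; simp)

-- A's forward loop: the z-trace is the prefix sum
theorem A_fwd (g : Int → Int) (M : Nat) :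
    (PySem.List.pyRange 0 (M : Int)).foldl
      (fun (s : PySem.Dict Int Int × Int) n =>
        (s.1.insert (n + 1) (s.2 + g n), s.2 + g n))
      (PySem.Dict.mk [(0, 0)], 0)
    = ((PySem.List.pyRange 0 (M : Int)).foldl
        (fun d n => d.insert (n + 1) (pvCum g 0 (n.toNat + 1))) (PySem.Dict.mk [(0, 0)]),
       pvCum g 0 M) := by
  induction M with
  | zero => simp [PySem.List.pyRange_one_eq_nil, pvCum]
  | succ M ih =>
      have hc : ((M + 1 : Nat) : Int) = (M : Int) + 1 := by push_cast; ring
      rw [hc, PySem.List.pyRange_one_succ_right (by positivity), List.foldl_append,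
        List.foldl_append, ih]
      simp only [List.foldl_cons, List.foldl_nil]
      have ht : ((M : Int)).toNat = M := by omega
      rw [Prod.ext_iff]
      refine ⟨by rw [ht]; congr 1; simp [pvCum], by simp [pvCum]⟩

theorem A_fwd_items (g : Int → Int) (M : Nat) :
    ((PySem.List.pyRange 0 (M : Int)).foldl
        (fun (d : PySem.Dict Int Int) n => d.insert (n + 1) (pvCum g 0 (n.toNat + 1)))
        (PySem.Dict.mk [(0, 0)])).items
    = [(0, 0)] ++ (PySem.List.pyRange 0 (M : Int)).map (fun n => (n + 1, pvCum g 0 (n.toNat + 1))) := by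
  rw [PySem.Dict.items_foldl_insert_fresh (PySem.List.pyRange 0 (M : Int)) (fun n => n + 1)
      (fun n => pvCum g 0 (n.toNat + 1)) (PySem.Dict.mk [(0, 0)])
      (by
        intro a ha
        rw [PySem.List.mem_pyRange_one] at ha
        simp [PySem.Dict.contains]
        omega)
      ((PySem.List.nodup_pyRange_one 0 (M : Int)).map (by intro x y h; simpa using h))]

theorem pyRange_neg_one_succ (m : Nat) :
    PySem.List.pyRange 0 (-((m : Int) + 1)) (-1)
    = PySem.List.pyRange 0 (-(m : Int)) (-1) ++ [-(m : Int)] := by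
  rw [PySem.List.pyRange_neg_one, PySem.List.pyRange_neg_one]
  rw [show ((0 : Int) - (-((m : Int) + 1))).toNat = m + 1 from by omega,
      show ((0 : Int) - (-(m : Int))).toNat = m from by omega, List.range_succ, List.map_append]
  simp

-- A's backward loop
theorem A_bwd (g : Int → Int) (d : PySem.Dict Int Int) (m : Nat) :
    (PySem.List.pyRange 0 (-(m : Int)) (-1)).foldl
      (fun (s : PySem.Dict Int Int × Int) n =>
        (s.1.insert (n - 1) (s.2 - g (n - 1)), s.2 - g (n - 1)))
      (d, 0)
    = ((PySem.List.pyRange 0 (-(m : Int)) (-1)).foldl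
        (fun d' n => d'.insert (n - 1) (-(pvCum g (n - 1) (1 - n).toNat))) d,
       -(pvCum g (-(m : Int)) m)) := by
  induction m with
  | zero =>
      have h : PySem.List.pyRange 0 (-(0 : Nat) : Int) (-1) = [] := by
        rw [PySem.List.pyRange_neg_one]; simp
      rw [h]
      simp [pvCum]
  | succ m ih =>
      have hc : ((m + 1 : Nat) : Int) = (m : Int) + 1 := by push_cast; ring
      rw [hc, pyRange_neg_one_succ, List.foldl_append, List.foldl_append, ih]
      simp only [List.foldl_cons, List.foldl_nil]
      have h4 : -pvCum g (-(m : Int) - 1) ((1 - -(m : Int)).toNat) = -pvCum g (-(m : Int)) m - g (-(m : Int) - 1) := by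
        rw [show ((1 : Int) - -(m : Int)).toNat = m + 1 from by omega, pvCum_succ_left,
            show -(m : Int) - 1 + 1 = -(m : Int) from by ring]
        ring
      have h5 : -pvCum g (-((m : Int) + 1)) (m + 1) = -pvCum g (-(m : Int)) m - g (-(m : Int) - 1) := by
        rw [show -((m : Int) + 1) = -(m : Int) - 1 from by ring, pvCum_succ_left,
            show -(m : Int) - 1 + 1 = -(m : Int) from by ring]
        ring
      rw [h4, h5]

-- B's pair-building loop
theorem B_pairs (g : Int → Int) (a : Int) (k : Nat) :
    (PySem.List.pyRange a (a + (k : Int))).foldl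
      (fun (s : List (Int × Int) × Int) f => (s.1 ++ [(f, s.2)], s.2 + g f)) ([], 0)
    = ((PySem.List.pyRange a (a + (k : Int))).map (fun f => (f, pvCum g a (f - a).toNat)),
       pvCum g a k) := by
  induction k with
  | zero => simp [PySem.List.pyRange_one_eq_nil, pvCum]
  | succ k ih =>
      have hc : a + ((k + 1 : Nat) : Int) = (a + (k : Int)) + 1 := by push_cast; ring
      rw [hc, PySem.List.pyRange_one_succ_right (by omega), List.foldl_append, ih]
      simp only [List.foldl_cons, List.foldl_nil, List.map_append, List.map_cons, List.map_nil]
      rw [Prod.ext_iff]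
      refine ⟨?_, by simp [pvCum]⟩
      congr 2
      rw [show (a + (k : Int) - a).toNat = k from by omega]

theorem pos_eq (g : Int → Int) (m M : Nat) :
    (PySem.List.pyRange 0 (M : Int)).map (fun n => (n + 1, pvCum g 0 (n.toNat + 1)))
    = (PySem.List.pyRange 1 ((M : Int) + 1)).map
        (fun f => (f, pvCum g (-(m : Int)) ((f - -(m : Int)).toNat) - pvCum g (-(m : Int)) m)) := by
  rw [PySem.List.pyRange_one 0 (M : Int), PySem.List.pyRange_one 1 ((M : Int) + 1),
      show ((M : Int) - 0).toNat = M from by omega,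
      show ((M : Int) + 1 - 1).toNat = M from by omega, List.map_map, List.map_map]
  apply List.map_congr_left
  intro k hk
  rw [List.mem_range] at hk
  simp only [Function.comp_apply]
  have h1 : ((0 : Int) + (k : Int)).toNat = k := by omega
  have h2 : ((1 : Int) + (k : Int) - -(m : Int)).toNat = m + (k + 1) := by omega
  have h4 : pvCum g (-(m : Int)) (m + (k + 1)) = pvCum g (-(m : Int)) m + pvCum g 0 (k + 1) := by
    rw [pvCum_add, show -(m : Int) + (m : Nat) = 0 from by ring]
  rw [h1, h2, h4, Prod.ext_iff]
  exact ⟨by ring, by ring⟩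

theorem neg_eq (g : Int → Int) (m : Nat) :
    (PySem.List.pyRange 0 (-(m : Int)) (-1)).map (fun n => (n - 1, -(pvCum g (n - 1) (1 - n).toNat)))
    = (PySem.List.pyRange (-1) (-(m : Int) - 1) (-1)).map
        (fun f => (f, pvCum g (-(m : Int)) ((f - -(m : Int)).toNat) - pvCum g (-(m : Int)) m)) := by
  rw [PySem.List.pyRange_neg_one 0 (-(m : Int)), PySem.List.pyRange_neg_one (-1) (-(m : Int) - 1),
      show ((0 : Int) - -(m : Int)).toNat = m from by omega,
      show ((-1 : Int) - (-(m : Int) - 1)).toNat = m from by omega, List.map_map, List.map_map]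
  apply List.map_congr_left
  intro k hk
  rw [List.mem_range] at hk
  simp only [Function.comp_apply]
  obtain ⟨a, ha⟩ : ∃ a : Nat, m = a + (k + 1) := ⟨m - (k + 1), by omega⟩
  have h1 : ((1 : Int) - ((0 : Int) - (k : Int))).toNat = k + 1 := by omega
  have h2 : ((-1 : Int) - (k : Int) - -(m : Int)).toNat = a := by omega
  rw [h1, h2]
  rw [Prod.ext_iff]
  refine ⟨by ring, ?_⟩
  have h3 : pvCum g (-(m : Int)) m = pvCum g (-(m : Int)) a + pvCum g (-(m : Int) + (a : Int)) (k + 1) := by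
    have h := pvCum_add g (-(m : Int)) a (k + 1)
    rw [← ha] at h
    exact h
  rw [h3, show -(m : Int) + (a : Int) = (0 : Int) - (k : Int) - 1 from by push_cast; omega]
  ring


theorem pvPyGet?_cons_zero {α : Type} (x : α) (l : List α) :
    PySem.List.pyGet? (x :: l) 0 = some x := by
  simp [PySem.List.pyGet?, PySem.List.pyIdx?]

theorem A_items (g : Int → Int) (m M : Nat) :
    ((PySem.List.pyRange 0 (-(m : Int)) (-1)).foldl
      (fun (s : PySem.Dict Int Int × Int) n =>
        (s.1.insert (n - 1) (s.2 - g (n - 1)), s.2 - g (n - 1)))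
      (((PySem.List.pyRange 0 (M : Int)).foldl
          (fun (s : PySem.Dict Int Int × Int) n =>
            (s.1.insert (n + 1) (s.2 + g n), s.2 + g n))
          (PySem.Dict.mk [(0, 0)], 0)).1, 0)).1.items
    = ([(0, 0)] ++ (PySem.List.pyRange 0 (M : Int)).map (fun n => (n + 1, pvCum g 0 (n.toNat + 1))))
      ++ (PySem.List.pyRange 0 (-(m : Int)) (-1)).map
          (fun n => (n - 1, -(pvCum g (n - 1) (1 - n).toNat))) := by
  rw [A_fwd g M]
  dsimp only
  rw [A_bwd g _ m]
  dsimp only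
  have h := PySem.Dict.items_foldl_insert_fresh
      (PySem.List.pyRange 0 (-(m : Int)) (-1))
      (fun n => n - 1) (fun n => -(pvCum g (n - 1) (1 - n).toNat))
      ((PySem.List.pyRange 0 (M : Int)).foldl
        (fun (d : PySem.Dict Int Int) n => d.insert (n + 1) (pvCum g 0 (n.toNat + 1)))
        (PySem.Dict.mk [(0, 0)]))
      (by
        intro n hn
        rw [PySem.List.mem_pyRange_neg_one] at hn
        have hne : ¬ (((PySem.List.pyRange 0 (M : Int)).foldl
            (fun (d : PySem.Dict Int Int) n => d.insert (n + 1) (pvCum g 0 (n.toNat + 1)))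
            (PySem.Dict.mk [(0, 0)])).contains (n - 1) = true) := by
          rw [PySem.Dict.contains_iff_mem_keys]
          simp only [PySem.Dict.keys, A_fwd_items]
          intro hmem
          simp only [List.map_append, List.map_map, List.mem_append, List.mem_map,
            Function.comp_def] at hmem
          rcases hmem with h | ⟨n', hn', hval⟩
          · simp at h; omega
          · rw [PySem.List.mem_pyRange_one] at hn'; omega
        exact Bool.not_eq_true _ ▸ hne)
      (by
        rw [PySem.List.pyRange_neg_one]
        simp only [List.map_map, Function.comp_def]
        refine List.nodup_range.map ?_
        intro x y h
        simp at h
        omega)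
  simp only [] at h
  rw [h, A_fwd_items]

theorem B_items (g : Int → Int) (c : Int) (m M : Nat) :
    (((List.map (fun f => (f, pvCum g (-(m : Int)) (f - -(m : Int)).toNat))
        (PySem.List.pyRange (-(m : Int)) 0)).reverse).foldl
      (fun (d : PySem.Dict Int Int) p => d.insert p.1 (p.2 - c))
      ((List.map (fun f => (f, pvCum g (-(m : Int)) (f - -(m : Int)).toNat))
        (PySem.List.pyRange 1 ((M : Int) + 1))).foldl
        (fun (d : PySem.Dict Int Int) p => d.insert p.1 (p.2 - c)) (PySem.Dict.mk [(0, 0)]))).items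
    = ([(0, 0)] ++ (PySem.List.pyRange 1 ((M : Int) + 1)).map
          (fun f => (f, pvCum g (-(m : Int)) (f - -(m : Int)).toNat - c)))
      ++ (PySem.List.pyRange (-1) (-(m : Int) - 1) (-1)).map
          (fun f => (f, pvCum g (-(m : Int)) (f - -(m : Int)).toNat - c)) := by
  have h1 : ((List.map (fun f => (f, pvCum g (-(m : Int)) (f - -(m : Int)).toNat))
        (PySem.List.pyRange 1 ((M : Int) + 1))).foldl
        (fun (d : PySem.Dict Int Int) p => d.insert p.1 (p.2 - c)) (PySem.Dict.mk [(0, 0)])).items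
      = [(0, 0)] ++ (PySem.List.pyRange 1 ((M : Int) + 1)).map
          (fun f => (f, pvCum g (-(m : Int)) (f - -(m : Int)).toNat - c)) := by
    have h := PySem.Dict.items_foldl_insert_fresh
        (List.map (fun f => (f, pvCum g (-(m : Int)) (f - -(m : Int)).toNat))
          (PySem.List.pyRange 1 ((M : Int) + 1)))
        (fun p => p.1) (fun p => p.2 - c) (PySem.Dict.mk [(0, 0)])
        (by
          intro p hp
          simp only [List.mem_map] at hp
          obtain ⟨f, hf, rfl⟩ := hp
          rw [PySem.List.mem_pyRange_one] at hf
          simp [PySem.Dict.contains]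
          omega)
        (by
          simp only [List.map_map]
          simp only [Function.comp_def]
          simpa using PySem.List.nodup_pyRange_one 1 ((M : Int) + 1))
    simp only [] at h
    rw [h]
    simp [List.map_map, Function.comp_def]
  rw [← List.map_reverse,
    show (PySem.List.pyRange (-(m : Int)) 0).reverse = PySem.List.pyRange (-1) (-(m : Int) - 1) (-1) from by
      rw [PySem.List.pyRange_neg_one_eq_reverse]; norm_num]
  have h2 := PySem.Dict.items_foldl_insert_fresh
      (List.map (fun f => (f, pvCum g (-(m : Int)) (f - -(m : Int)).toNat))
        (PySem.List.pyRange (-1) (-(m : Int) - 1) (-1)))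
      (fun p => p.1) (fun p => p.2 - c)
      ((List.map (fun f => (f, pvCum g (-(m : Int)) (f - -(m : Int)).toNat))
        (PySem.List.pyRange 1 ((M : Int) + 1))).foldl
        (fun (d : PySem.Dict Int Int) p => d.insert p.1 (p.2 - c)) (PySem.Dict.mk [(0, 0)]))
      (by
        intro p hp
        simp only [List.mem_map] at hp
        obtain ⟨f, hf, rfl⟩ := hp
        rw [PySem.List.mem_pyRange_neg_one] at hf
        have : ¬ (((List.map (fun f => (f, pvCum g (-(m : Int)) (f - -(m : Int)).toNat))
            (PySem.List.pyRange 1 ((M : Int) + 1))).foldl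
            (fun (d : PySem.Dict Int Int) p => d.insert p.1 (p.2 - c)) (PySem.Dict.mk [(0, 0)])).contains f = true) := by
          rw [PySem.Dict.contains_iff_mem_keys]
          simp only [PySem.Dict.keys, h1]
          intro hmem
          simp only [List.map_append, List.map_map, List.mem_append, List.mem_map,
            Function.comp_def] at hmem
          rcases hmem with h | ⟨f', hf', hval⟩
          · simp at h; omega
          · rw [PySem.List.mem_pyRange_one] at hf'; omega
        exact Bool.not_eq_true _ ▸ this
      )
      (by
        simp only [List.map_map, Function.comp_def]
        rw [PySem.List.pyRange_neg_one]
        simp only [List.map_map, Function.comp_def]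
        refine List.nodup_range.map ?_
        intro x y h
        simp at h
        omega)
  simp only [] at h2
  rw [h2, h1, List.map_map, Function.comp_def]

-- ===== VERDICT (by name: the statement is the Claim_ definition above) =====
theorem compute_z_by_floor_cm_spec : Claim_equal_compute_z_by_floor_cm := by
  intro floors default_cm overrides _
  unfold Spec_compute_z_by_floor_cm
  have h0 := zero_mem_pvTouched floors overrides
  have ht : pvTouched floors overrides ≠ [] := List.ne_nil_of_mem h0
  cases hmn : PySem.List.min? (pvTouched floors overrides) (fun x => x) with
  | none => exact absurd ((PySem.List.min?_eq_none_iff _ _).mp hmn) ht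
  | some fmin =>
  cases hmx : PySem.List.max? (pvTouched floors overrides) (fun x => x) with
  | none => exact absurd ((PySem.List.max?_eq_none_iff _ _).mp hmx) ht
  | some fmax =>
  have hfmin : fmin ≤ 0 := PySem.List.min?_isMin hmn 0 h0
  have hfmax : (0 : Int) ≤ fmax := PySem.List.max?_isMax hmx 0 h0
  obtain ⟨m, hm⟩ : ∃ m : Nat, fmin = -(m : Int) := ⟨(-fmin).toNat, by omega⟩
  obtain ⟨M, hM⟩ : ∃ M : Nat, fmax = (M : Int) := ⟨fmax.toNat, by omega⟩
  subst hm hM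
  simp only [compute_z_by_floor_cm, compute_z_by_floor_cm_alt, hmn, hmx, Option.getD_some,
    if_neg ht, pvGapA_eq_pvGapB]
  rw [neg_neg]
  rw [show ((M : Int) + 1) = -(m : Int) + ((m + (M + 1) : Nat) : Int) from by push_cast; ring,
    B_pairs (pvGapB overrides default_cm) (-(m : Int)) (m + (M + 1))]
  dsimp only
  rw [show -(m : Int) + ((m + (M + 1) : Nat) : Int) = ((M : Int) + 1) from by push_cast; ring]
  rw [PySem.List.pyRange_one_append (-(m : Int)) 0 ((M : Int) + 1) (by omega) (by omega),
    List.map_append, PySem.List.slice_to_natCast, PySem.List.slice_from_natCast,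
    List.take_left' (by simp [PySem.List.length_pyRange_one]),
    List.drop_left' (by simp [PySem.List.length_pyRange_one])]
  rw [PySem.List.pyRange_one_cons (show (0 : Int) < (M : Int) + 1 from by omega),
    show (0 : Int) + 1 = 1 from by norm_num, List.map_cons]
  rw [pvPyGet?_cons_zero, Option.getD_some]
  dsimp only
  rw [show ((0 : Int) - -(m : Int)).toNat = m from by omega]
  rw [PySem.List.slice_from_one, List.tail_cons]
  rw [B_items (pvGapB overrides default_cm) (pvCum (pvGapB overrides default_cm) (-(m : Int)) m) m M]
  rw [A_items (pvGapB overrides default_cm) m M]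
  rw [pos_eq (pvGapB overrides default_cm) m M, neg_eq (pvGapB overrides default_cm) m]
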